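-- pv_equiv track=rewrite | github.com/YitaoXU/RoBep | src/bce/utils/tools.py | classify_antigen
-- ===== SOURCE A (Python) =====
-- def classify_antigen(organisms):
--     for org in organisms:
--         if "virus" in org.lower() or "coronavirus" in org.lower():
--             return "viral"
--         elif "homo sapiens" in org.lower():
--             return "human"
--         elif "bacteria" in org.lower() or "bacillus" in org.lower():
--             return "bacterial"
--         elif "tumor" in org.lower() or "cancer" in org.lower():
--             return "tumor"
--     return "other"
-- ===== SOURCE B (Python) =====
-- CATEGORIES = [
--     ("viral", ("virus", "coronavirus")),
--     ("human", ("homo sapiens",)),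
--     ("bacterial", ("bacteria", "bacillus")),
--     ("tumor", ("tumor", "cancer")),
-- ]
--
-- def _first_match_index(kws, lows):
--     for i, low in enumerate(lows):
--         if any(kw in low for kw in kws):
--             return i
--     return None
--
-- def _best_match(lows):
--     # category-major scan: for each category find its earliest matching organism;
--     # keep the smallest index, ties resolved by category priority order
--     best = None
--     for cat, kws in CATEGORIES:
--         i = _first_match_index(kws, lows)
--         if i is not None and (best is None or i < best[0]):
--             best = (i, cat)
--     return best
--
-- def classify_antigen(organisms):
--     lows = [org.lower() for org in organisms]
--     best = _best_match(lows)
--     return "other" if best is None else best[1]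
-- ===== Notes on version B (the rewrite author's own statement) =====
-- stated objective: alternative
-- what changed: Inverts the traversal: instead of A's organism-major early-return elif chain, B scans category-major, computing for each category the index of its first matching organism and returning the category with the lexicographically minimal (index, priority) pair.
import Mathlib
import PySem

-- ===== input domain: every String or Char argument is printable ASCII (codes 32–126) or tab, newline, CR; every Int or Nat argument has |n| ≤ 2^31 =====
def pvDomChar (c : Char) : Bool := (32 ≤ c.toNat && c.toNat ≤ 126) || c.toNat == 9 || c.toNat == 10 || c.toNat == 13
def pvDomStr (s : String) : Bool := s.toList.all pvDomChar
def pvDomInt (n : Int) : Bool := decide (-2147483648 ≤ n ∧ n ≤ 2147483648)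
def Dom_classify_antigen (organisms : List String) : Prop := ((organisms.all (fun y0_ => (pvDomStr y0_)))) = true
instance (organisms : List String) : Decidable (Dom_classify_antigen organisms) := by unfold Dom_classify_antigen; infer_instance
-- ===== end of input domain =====

-- B inverts the traversal: category-major scan keeping the lexicographically minimal (organism index, category priority), instead of A's organism-major elif chain (alternative, same cost).


-- ===== PORT A =====
def classify_antigen : List String → String
  | [] => "other"
  | org :: rest =>
    if PySem.Str.isIn "virus" (PySem.Str.lower org) || PySem.Str.isIn "coronavirus" (PySem.Str.lower org) then "viral"
    else if PySem.Str.isIn "homo sapiens" (PySem.Str.lower org) then "human"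
    else if PySem.Str.isIn "bacteria" (PySem.Str.lower org) || PySem.Str.isIn "bacillus" (PySem.Str.lower org) then "bacterial"
    else if PySem.Str.isIn "tumor" (PySem.Str.lower org) || PySem.Str.isIn "cancer" (PySem.Str.lower org) then "tumor"
    else classify_antigen rest

-- ===== PORT B =====
def pvCategories : List (String × List String) :=
  [("viral", ["virus", "coronavirus"]),
   ("human", ["homo sapiens"]),
   ("bacterial", ["bacteria", "bacillus"]),
   ("tumor", ["tumor", "cancer"])]

-- _first_match_index: index of the first element of lows containing some keyword (enumerate with break)
def pvFirstMatchIdx (kws : List String) : List String → Nat → Option Nat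
  | [], _ => none
  | low :: rest, i =>
    if kws.any (fun kw => PySem.Str.isIn kw low) then some i
    else pvFirstMatchIdx kws rest (i + 1)

-- the 'if i is not None and (best is None or i < best[0]): best = (i, cat)' update
def pvStep (best : Option (Nat × String)) (cat : String) (m : Option Nat) : Option (Nat × String) :=
  match m with
  | none => best
  | some i =>
    match best with
    | none => some (i, cat)
    | some b => if i < b.1 then some (i, cat) else some b

-- _best_match
def pvBestMatch (lows : List String) : Option (Nat × String) :=
  pvCategories.foldl (fun best c => pvStep best c.1 (pvFirstMatchIdx c.2 lows 0)) none

def classify_antigen_alt (organisms : List String) : String :=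
  let lows := organisms.map PySem.Str.lower
  match pvBestMatch lows with
  | none => "other"
  | some b => b.2

-- ===== PRECONDITION & SPEC =====
def Spec_classify_antigen (organisms : List String) (out : String) : Prop := out = classify_antigen_alt organisms
instance (organisms : List String) (out : String) : Decidable (Spec_classify_antigen organisms out) := by unfold Spec_classify_antigen; infer_instance

-- ===== CLAIM (what is proved, stated in full; the proofs are below) =====
def Claim_equal_classify_antigen : Prop := ∀ (organisms : List String), Dom_classify_antigen organisms → Spec_classify_antigen organisms (classify_antigen organisms)

-- ===== LEMMAS AND PROOFS =====

-- pvFirstMatchIdx with start index n is the 0-based one shifted by n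
theorem pvFirstMatchIdx_shift (kws : List String) (l : List String) (n : Nat) :
    pvFirstMatchIdx kws l n = (pvFirstMatchIdx kws l 0).map (· + n) := by
  induction l generalizing n with
  | nil => rfl
  | cons x rest ih =>
    rw [pvFirstMatchIdx, pvFirstMatchIdx, ih (n + 1), ih 1]
    by_cases h : (kws.any fun kw => PySem.Str.isIn kw x) = true
    · rw [if_pos h, if_pos h]; simp
    · rw [if_neg h, if_neg h]
      cases pvFirstMatchIdx kws rest 0 <;> (simp; try omega)

theorem pvFirstMatchIdx_cons (kws : List String) (x : String) (rest : List String) :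
    pvFirstMatchIdx kws (x :: rest) 0 =
      (if kws.any (fun kw => PySem.Str.isIn kw x) then some 0
       else (pvFirstMatchIdx kws rest 0).map (· + 1)) := by
  rw [pvFirstMatchIdx]
  split_ifs with h
  · rfl
  · exact pvFirstMatchIdx_shift kws rest 1

def pvAllPos (best : Option (Nat × String)) : Prop := ∀ b, best = some b → 0 < b.1

theorem pvStep_zero_keep (c cat : String) (m : Option Nat) :
    pvStep (some (0, c)) cat m = some (0, c) := by
  cases m <;> simp [pvStep]

theorem pvStep_zero_win (best : Option (Nat × String)) (cat : String) (h : pvAllPos best) :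
    pvStep best cat (some 0) = some (0, cat) := by
  cases best with
  | none => rfl
  | some b => have := h b rfl; simp [pvStep, this]

theorem pvStep_allPos (best : Option (Nat × String)) (cat : String) (m : Option Nat)
    (h : pvAllPos best) : pvAllPos (pvStep best cat (m.map (· + 1))) := by
  cases m with
  | none => exact h
  | some i =>
    cases best with
    | none =>
      intro b hb
      simp only [Option.map_some, pvStep] at hb
      cases hb; simp
    | some b =>
      intro b' hb'
      have hb0 := h b rfl
      simp only [Option.map_some, pvStep] at hb'
      split_ifs at hb' <;> (cases hb'; simp; try omega)

theorem pvStep_shift (best : Option (Nat × String)) (cat : String) (m : Option Nat) :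
    pvStep (best.map (fun b => (b.1 + 1, b.2))) cat (m.map (· + 1)) =
      (pvStep best cat m).map (fun b => (b.1 + 1, b.2)) := by
  cases m with
  | none => rfl
  | some i =>
    cases best with
    | none => rfl
    | some b =>
      simp only [Option.map_some, pvStep]
      by_cases h : i < b.1
      · rw [if_pos h, if_pos (by omega : i + 1 < b.1 + 1)]; rfl
      · rw [if_neg h, if_neg (by omega : ¬ i + 1 < b.1 + 1)]; rfl

theorem pvBestMatch_cons (l : String) (lows : List String) :
    pvBestMatch (l :: lows) =
      (if PySem.Str.isIn "virus" l || PySem.Str.isIn "coronavirus" l then some (0, "viral")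
       else if PySem.Str.isIn "homo sapiens" l then some (0, "human")
       else if PySem.Str.isIn "bacteria" l || PySem.Str.isIn "bacillus" l then some (0, "bacterial")
       else if PySem.Str.isIn "tumor" l || PySem.Str.isIn "cancer" l then some (0, "tumor")
       else (pvBestMatch lows).map (fun b => (b.1 + 1, b.2))) := by
  have key : ∀ (m1 m2 m3 m4 : Option Nat),
      pvStep (pvStep (pvStep (pvStep none "viral" (m1.map (· + 1))) "human" (m2.map (· + 1)))
          "bacterial" (m3.map (· + 1))) "tumor" (m4.map (· + 1)) =
        Option.map (fun b => (b.1 + 1, b.2))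
          (pvStep (pvStep (pvStep (pvStep none "viral" m1) "human" m2) "bacterial" m3) "tumor" m4) := by
    intro m1 m2 m3 m4
    conv_rhs => rw [← pvStep_shift, ← pvStep_shift, ← pvStep_shift, ← pvStep_shift]
    rfl
  have p0 : pvAllPos (none : Option (Nat × String)) := by intro b hb; cases hb
  have p1 := pvStep_allPos none "viral" (pvFirstMatchIdx ["virus", "coronavirus"] lows 0) p0
  have p2 := pvStep_allPos _ "human" (pvFirstMatchIdx ["homo sapiens"] lows 0) p1
  have p3 := pvStep_allPos _ "bacterial" (pvFirstMatchIdx ["bacteria", "bacillus"] lows 0) p2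
  simp only [pvBestMatch, pvCategories, List.foldl, pvFirstMatchIdx_cons, List.any_cons,
    List.any_nil, Bool.or_false]
  by_cases h1 : (PySem.Str.isIn "virus" l || PySem.Str.isIn "coronavirus" l) = true
  · rw [if_pos h1, if_pos h1,
      show pvStep none "viral" (some 0) = some (0, "viral") from rfl,
      pvStep_zero_keep, pvStep_zero_keep, pvStep_zero_keep]
  · by_cases h2 : PySem.Str.isIn "homo sapiens" l = true
    · rw [if_neg h1, if_neg h1, if_pos h2, if_pos h2,
        pvStep_zero_win _ _ p1, pvStep_zero_keep, pvStep_zero_keep]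
    · by_cases h3 : (PySem.Str.isIn "bacteria" l || PySem.Str.isIn "bacillus" l) = true
      · rw [if_neg h1, if_neg h1, if_neg h2, if_neg h2, if_pos h3, if_pos h3,
          pvStep_zero_win _ _ p2, pvStep_zero_keep]
      · by_cases h4 : (PySem.Str.isIn "tumor" l || PySem.Str.isIn "cancer" l) = true
        · rw [if_neg h1, if_neg h1, if_neg h2, if_neg h2, if_neg h3, if_neg h3, if_pos h4, if_pos h4,
            pvStep_zero_win _ _ p3]
        · rw [if_neg h1, if_neg h1, if_neg h2, if_neg h2, if_neg h3, if_neg h3, if_neg h4, if_neg h4]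
          exact key _ _ _ _
theorem classify_antigen_eq_alt (organisms : List String) :
    classify_antigen organisms = classify_antigen_alt organisms := by
  induction organisms with
  | nil => rfl
  | cons org rest ih =>
    rw [classify_antigen]
    simp only [classify_antigen_alt, List.map]
    rw [pvBestMatch_cons]
    split_ifs <;> try rfl
    rw [ih]
    simp only [classify_antigen_alt]
    cases pvBestMatch (rest.map PySem.Str.lower) <;> rfl

-- ===== VERDICT (by name: the statement is the Claim_ definition above) =====
theorem classify_antigen_spec : Claim_equal_classify_antigen := by
  intro organisms _
  exact classify_antigen_eq_alt organisms
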